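-- pv_equiv track=rewrite | github.com/SamuelAleks/file-tree-generator | src/csharp_parser.py | _find_method_boundary
-- ===== SOURCE A (Python) =====
-- def _find_method_boundary(content, start_pos):
--     """Find the end position of a method based on braces"""
--     # Find opening brace
--     brace_pos = content.find('{', start_pos)
--     if brace_pos == -1:
--         # Handle expression-bodied methods
--         semicolon_pos = content.find(';', start_pos)
--         return semicolon_pos + 1 if semicolon_pos != -1 else len(content)
--
--     # Count braces to find matching closing brace
--     brace_count = 1
--     pos = brace_pos + 1
--
--     while brace_count > 0 and pos < len(content):
--         if content[pos] == '{':
--             brace_count += 1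
--         elif content[pos] == '}':
--             brace_count -= 1
--         pos += 1
--
--     return pos
-- ===== SOURCE B (Python) =====
-- def _find_method_boundary(content, start_pos):
--     """Find the end position of a method based on braces (find-jumping version)"""
--     brace_pos = content.find('{', start_pos)
--     if brace_pos == -1:
--         semicolon_pos = content.find(';', start_pos)
--         return semicolon_pos + 1 if semicolon_pos != -1 else len(content)
--     depth = 1
--     pos = brace_pos + 1
--     while True:
--         next_close = content.find('}', pos)
--         if next_close == -1:
--             return len(content)
--         next_open = content.find('{', pos)
--         if next_open != -1 and next_open < next_close:
--             depth += 1
--             pos = next_open + 1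
--         else:
--             depth -= 1
--             if depth == 0:
--                 return next_close + 1
--             pos = next_close + 1
-- ===== Notes on version B (the rewrite author's own statement) =====
-- stated objective: alternative
-- what changed: Instead of walking the string character by character while counting braces, B jumps directly between successive str.find positions of '{' and '}', so only brace positions are visited by the loop.
import Mathlib
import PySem

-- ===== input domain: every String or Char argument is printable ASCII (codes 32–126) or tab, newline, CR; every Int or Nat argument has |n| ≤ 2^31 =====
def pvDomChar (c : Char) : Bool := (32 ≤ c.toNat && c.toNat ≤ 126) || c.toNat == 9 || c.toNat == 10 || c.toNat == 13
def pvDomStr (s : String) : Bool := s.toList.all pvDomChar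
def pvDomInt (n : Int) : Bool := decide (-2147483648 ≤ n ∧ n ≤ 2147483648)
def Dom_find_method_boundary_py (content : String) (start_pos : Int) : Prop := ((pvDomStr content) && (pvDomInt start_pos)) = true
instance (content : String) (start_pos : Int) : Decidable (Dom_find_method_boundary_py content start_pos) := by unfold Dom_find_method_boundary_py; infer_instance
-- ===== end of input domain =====

-- B replaces A's character-by-character brace-counting loop with jumps between successive
-- str.find positions of '{' and '}' (same return value everywhere).

-- ===== PORT A =====
-- A's while loop: scan one character at a time, maintaining the brace count.
-- The fuel argument only makes the recursion structural; cs.length fuel always suffices.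
def pvALoop (cs : List Char) : Int → Nat → Nat → Nat
  | _, pos, 0 => pos
  | braceCount, pos, fuel + 1 =>
    if 0 < braceCount ∧ pos < cs.length then
      pvALoop cs
        (if cs.getD pos ' ' = '{' then braceCount + 1
         else if cs.getD pos ' ' = '}' then braceCount - 1 else braceCount)
        (pos + 1) fuel
    else pos

def find_method_boundary_py (content : String) (start_pos : Int) : Int :=
  if PySem.Chars.findFrom content.toList ['{'] start_pos = -1 then
    if PySem.Chars.findFrom content.toList [';'] start_pos ≠ -1 then
      PySem.Chars.findFrom content.toList [';'] start_pos + 1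
    else (content.toList.length : Int)
  else
    ((pvALoop content.toList 1
        (PySem.Chars.findFrom content.toList ['{'] start_pos + 1).toNat
        content.toList.length : Nat) : Int)

-- ===== PORT B =====
-- B's loop: jump between the next '}' and the next '{' instead of visiting every character.
-- The fuel argument only makes the recursion structural; cs.length fuel always suffices.
def pvBLoop (cs : List Char) : Int → Nat → Nat → Int
  | _, _, 0 => (cs.length : Int)
  | depth, pos, fuel + 1 =>
    if PySem.Chars.findFrom cs ['}'] (pos : Int) = -1 then (cs.length : Int)
    else
      if ¬ PySem.Chars.findFrom cs ['{'] (pos : Int) = -1 ∧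
          PySem.Chars.findFrom cs ['{'] (pos : Int) < PySem.Chars.findFrom cs ['}'] (pos : Int) then
        pvBLoop cs (depth + 1) ((PySem.Chars.findFrom cs ['{'] (pos : Int)).toNat + 1) fuel
      else if depth - 1 = 0 then PySem.Chars.findFrom cs ['}'] (pos : Int) + 1
      else pvBLoop cs (depth - 1) ((PySem.Chars.findFrom cs ['}'] (pos : Int)).toNat + 1) fuel

def find_method_boundary_py_alt (content : String) (start_pos : Int) : Int :=
  if PySem.Chars.findFrom content.toList ['{'] start_pos = -1 then
    if PySem.Chars.findFrom content.toList [';'] start_pos ≠ -1 then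
      PySem.Chars.findFrom content.toList [';'] start_pos + 1
    else (content.toList.length : Int)
  else
    pvBLoop content.toList 1
      (PySem.Chars.findFrom content.toList ['{'] start_pos + 1).toNat
      content.toList.length

-- ===== PRECONDITION & SPEC =====
def Spec_find_method_boundary_py (content : String) (start_pos : Int) (out : Int) : Prop := out = find_method_boundary_py_alt content start_pos
instance (content : String) (start_pos : Int) (out : Int) : Decidable (Spec_find_method_boundary_py content start_pos out) := by unfold Spec_find_method_boundary_py; infer_instance

-- ===== CLAIM (what is proved, stated in full; the proofs are below) =====
def Claim_equal_find_method_boundary_py : Prop := ∀ (content : String) (start_pos : Int), Dom_find_method_boundary_py content start_pos → Spec_find_method_boundary_py content start_pos (find_method_boundary_py content start_pos)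

-- ===== LEMMAS AND PROOFS =====

-- facts about a successful single-character find
lemma pvFound_bounds (cs : List Char) (c : Char) (k : Nat) (hk : k ≤ cs.length)
    (h : PySem.Chars.findFrom cs [c] (k : Int) none ≠ -1) :
    0 ≤ PySem.Chars.findFrom cs [c] (k : Int) none ∧
    k ≤ (PySem.Chars.findFrom cs [c] (k : Int) none).toNat ∧
    (PySem.Chars.findFrom cs [c] (k : Int) none).toNat < cs.length ∧
    cs[(PySem.Chars.findFrom cs [c] (k : Int) none).toNat]? = some c := by
  obtain ⟨h1, h2, _⟩ := PySem.Chars.findFrom_natCast_spec cs [c] k hk h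
  set r := PySem.Chars.findFrom cs [c] (k : Int) none with hr
  obtain ⟨t, ht⟩ := h2
  have hget : cs[r.toNat]? = some c := by
    rw [← List.head?_drop, ← ht]; rfl
  have hlt : r.toNat < cs.length := by
    by_contra hge
    rw [List.getElem?_eq_none (by omega)] at hget
    simp at hget
  exact ⟨by omega, by omega, hlt, hget⟩

-- the Int-start find reduces to some Nat-start find (slice-bound clamping), for a nonempty needle
lemma pvClamp_congr (s sub : List Char) (u v : Int)
    (h : (if u < 0 then (if u + (s.length : Int) < 0 then 0 else u + s.length) else u)
       = (if v < 0 then (if v + (s.length : Int) < 0 then 0 else v + s.length) else v)) :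
    PySem.Chars.findFrom s sub u none = PySem.Chars.findFrom s sub v none := by
  simp only [PySem.Chars.findFrom]
  rw [h]

lemma pvFindFrom_int_cases (s sub : List Char) (hsub : sub ≠ []) (start : Int) :
    ∃ k : Nat, k ≤ s.length ∧
      PySem.Chars.findFrom s sub start none = PySem.Chars.findFrom s sub (k : Int) none := by
  by_cases h1 : start < 0
  · refine ⟨(start + s.length).toNat, by omega, pvClamp_congr s sub _ _ ?_⟩
    split_ifs <;> omega
  · by_cases h2 : start ≤ (s.length : Int)
    · refine ⟨start.toNat, by omega, pvClamp_congr s sub _ _ ?_⟩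
      split_ifs <;> omega
    · refine ⟨s.length, le_refl _, ?_⟩
      have hL : PySem.Chars.findFrom s sub start none = -1 := by
        simp only [PySem.Chars.findFrom]
        split_ifs <;> omega
      have hR : PySem.Chars.findFrom s sub (s.length : Int) none = -1 := by
        rw [PySem.Chars.findFrom_natCast s sub s.length (le_refl _)]
        have hnil : PySem.Chars.find ([] : List Char) sub = -1 := by
          rw [PySem.Chars.find_eq_neg_one_iff]
          simp [hsub]
        simp [List.drop_length, hnil]
      rw [hL, hR]

-- minimality of a successful find: no occurrence of c strictly before it (from the start on)
lemma pvFound_min (cs : List Char) (c : Char) (k : Nat) (hk : k ≤ cs.length)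
    (h : PySem.Chars.findFrom cs [c] (k : Int) none ≠ -1) :
    ∀ i, k ≤ i → i < (PySem.Chars.findFrom cs [c] (k : Int) none).toNat → cs[i]? ≠ some c := by
  obtain ⟨_, _, hmin⟩ := PySem.Chars.findFrom_natCast_spec cs [c] k hk h
  intro i hi1 hi2 hgc
  refine hmin i hi1 hi2 ?_
  have hh : (cs.drop i).head? = some c := by rw [List.head?_drop]; exact hgc
  cases hd : cs.drop i with
  | nil => rw [hd] at hh; simp at hh
  | cons a t =>
    rw [hd] at hh
    simp at hh
    subst hh
    exact ⟨t, rfl⟩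

-- a failed find: no occurrence of c at or after the start
lemma pvNotFound (cs : List Char) (c : Char) (k : Nat) (hk : k ≤ cs.length)
    (h : PySem.Chars.findFrom cs [c] (k : Int) none = -1) :
    ∀ i, k ≤ i → cs[i]? ≠ some c := by
  rw [PySem.Chars.findFrom_natCast_eq_neg_one_iff cs [c] k hk] at h
  intro i hi hgc
  refine h ?_
  have hg : (cs.drop k)[i - k]? = some c := by
    rw [List.getElem?_drop]
    rw [show k + (i - k) = i by omega]
    exact hgc
  have hmem : c ∈ cs.drop k := List.mem_of_getElem? hg
  obtain ⟨l1, l2, hl⟩ := List.append_of_mem hmem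
  exact ⟨l1, l2, by rw [hl]; simp⟩

-- any two sufficient fuels compute the same A-scan
lemma pvALoop_fuel (cs : List Char) : ∀ f1 f2 pos (d : Int), cs.length - pos ≤ f1 →
    cs.length - pos ≤ f2 → pvALoop cs d pos f1 = pvALoop cs d pos f2 := by
  intro f1
  induction f1 with
  | zero =>
    intro f2 pos d h1 h2
    have hge : ¬ pos < cs.length := by omega
    cases f2 with
    | zero => rfl
    | succ g => rw [pvALoop.eq_1, pvALoop.eq_2, if_neg (fun hc => hge hc.2)]
  | succ f ih =>
    intro f2 pos d h1 h2
    by_cases hlt : pos < cs.length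
    · cases f2 with
      | zero => omega
      | succ g =>
        rw [pvALoop.eq_2, pvALoop.eq_2]
        by_cases hc : 0 < d ∧ pos < cs.length
        · rw [if_pos hc, if_pos hc]
          exact ih g (pos + 1) _ (by omega) (by omega)
        · rw [if_neg hc, if_neg hc]
    · cases f2 with
      | zero => rw [pvALoop.eq_1, pvALoop.eq_2, if_neg (fun hc => hlt hc.2)]
      | succ g => rw [pvALoop.eq_2, pvALoop.eq_2, if_neg (fun hc => hlt hc.2), if_neg (fun hc => hlt hc.2)]

-- A's scan passes over a brace-free stretch without changing the count
lemma pvALoop_skip (cs : List Char) : ∀ n pos q (d : Int) f g, 0 < d → pos ≤ q →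
    q ≤ cs.length → q - pos ≤ n → cs.length - pos ≤ f → cs.length - q ≤ g →
    (∀ i, pos ≤ i → i < q → cs[i]? ≠ some '{' ∧ cs[i]? ≠ some '}') →
    pvALoop cs d pos f = pvALoop cs d q g := by
  intro n
  induction n with
  | zero =>
    intro pos q d f g _ h1 _ h3 hf hg _
    have hpq : pos = q := by omega
    subst hpq
    exact pvALoop_fuel cs f g pos d hf hg
  | succ n ih =>
    intro pos q d f g hd h1 h2 h3 hf hg hchars
    by_cases hpq : pos = q
    · subst hpq
      exact pvALoop_fuel cs f g pos d hf hg
    · have hlt : pos < cs.length := by omega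
      obtain ⟨f', rfl⟩ : ∃ f', f = f' + 1 := ⟨f - 1, by omega⟩
      have hch := hchars pos (le_refl _) (by omega)
      have hgetc : cs[pos]? = some (cs.getD pos ' ') := by
        rw [List.getD_eq_getElem cs ' ' hlt]
        exact List.getElem?_eq_getElem hlt
      have hne1 : cs.getD pos ' ' ≠ '{' := fun e => hch.1 (by rw [hgetc, e])
      have hne2 : cs.getD pos ' ' ≠ '}' := fun e => hch.2 (by rw [hgetc, e])
      rw [pvALoop.eq_2, if_pos ⟨hd, hlt⟩, if_neg hne1, if_neg hne2]
      exact ih (pos + 1) q d f' g hd (by omega) h2 (by omega) (by omega) hg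
        (fun i hi1 hi2 => hchars i (by omega) hi2)

-- A's scan with no closing brace ahead ends at the length of the string
lemma pvALoop_noclose (cs : List Char) : ∀ n pos (d : Int) f, 0 < d → pos ≤ cs.length →
    cs.length - pos ≤ n → cs.length - pos ≤ f → (∀ i, pos ≤ i → cs[i]? ≠ some '}') →
    pvALoop cs d pos f = cs.length := by
  intro n
  induction n with
  | zero =>
    intro pos d f hd h1 h2 hf _
    have hpl : pos = cs.length := by omega
    cases f with
    | zero => exact hpl
    | succ g => rw [pvALoop.eq_2, if_neg (by omega)]; exact hpl
  | succ n ih =>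
    intro pos d f hd h1 h2 hf hch
    by_cases hpl : pos < cs.length
    · obtain ⟨f', rfl⟩ : ∃ f', f = f' + 1 := ⟨f - 1, by omega⟩
      have hgetc : cs[pos]? = some (cs.getD pos ' ') := by
        rw [List.getD_eq_getElem cs ' ' hpl]
        exact List.getElem?_eq_getElem hpl
      have hne2 : cs.getD pos ' ' ≠ '}' := fun e => hch pos (le_refl _) (by rw [hgetc, e])
      rw [pvALoop.eq_2, if_pos ⟨hd, hpl⟩]
      by_cases hop : cs.getD pos ' ' = '{'
      · rw [if_pos hop]
        exact ih (pos + 1) (d + 1) f' (by omega) (by omega) (by omega) (by omega)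
          (fun i hi => hch i (by omega))
      · rw [if_neg hop, if_neg hne2]
        exact ih (pos + 1) d f' hd (by omega) (by omega) (by omega)
          (fun i hi => hch i (by omega))
    · have hpl' : pos = cs.length := by omega
      cases f with
      | zero => exact hpl'
      | succ g => rw [pvALoop.eq_2, if_neg (by omega)]; exact hpl'

-- main loop equivalence: the char-by-char scan and the find-jumping loop agree
lemma pvMain (cs : List Char) : ∀ n pos (d : Int) fa fb, 0 < d → pos ≤ cs.length →
    cs.length - pos ≤ n → cs.length - pos ≤ fa → cs.length - pos ≤ fb →
    ((pvALoop cs d pos fa : Nat) : Int) = pvBLoop cs d pos fb := by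
  intro n
  induction n with
  | zero =>
    intro pos d fa fb hd hpos hn hfa hfb
    have hpl : pos = cs.length := by omega
    have hc : PySem.Chars.findFrom cs ['}'] (pos : Int) = -1 := by
      rw [PySem.Chars.findFrom_natCast_eq_neg_one_iff cs ['}'] pos hpos, hpl]
      simp
    have hA : pvALoop cs d pos fa = cs.length := by
      cases fa with
      | zero => exact hpl
      | succ g => rw [pvALoop.eq_2, if_neg (by omega)]; exact hpl
    rw [hA]
    cases fb with
    | zero => rfl
    | succ g => rw [pvBLoop.eq_2, if_pos hc]
  | succ n ih =>
    intro pos d fa fb hd hpos hn hfa hfb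
    by_cases hc : PySem.Chars.findFrom cs ['}'] (pos : Int) = -1
    · have hA := pvALoop_noclose cs (cs.length - pos) pos d fa hd hpos (le_refl _) hfa
        (pvNotFound cs '}' pos hpos hc)
      rw [hA]
      cases fb with
      | zero => rfl
      | succ g => rw [pvBLoop.eq_2, if_pos hc]
    · obtain ⟨hc0, hc1, hc2, hc3⟩ := pvFound_bounds cs '}' pos hpos hc
      obtain ⟨fb', rfl⟩ : ∃ g, fb = g + 1 := ⟨fb - 1, by omega⟩
      rw [pvBLoop.eq_2, if_neg hc]
      by_cases ho : ¬ PySem.Chars.findFrom cs ['{'] (pos : Int) = -1 ∧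
          PySem.Chars.findFrom cs ['{'] (pos : Int) < PySem.Chars.findFrom cs ['}'] (pos : Int)
      · rw [if_pos ho]
        obtain ⟨hno, hlt⟩ := ho
        obtain ⟨ho0, ho1, ho2, ho3⟩ := pvFound_bounds cs '{' pos hpos hno
        have hskip := pvALoop_skip cs ((PySem.Chars.findFrom cs ['{'] (pos : Int)).toNat - pos)
          pos (PySem.Chars.findFrom cs ['{'] (pos : Int)).toNat d fa
          (cs.length - (PySem.Chars.findFrom cs ['{'] (pos : Int)).toNat)
          hd ho1 (by omega) (by omega) hfa (by omega)
          (fun i hi1 hi2 => ⟨pvFound_min cs '{' pos hpos hno i hi1 hi2,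
            pvFound_min cs '}' pos hpos hc i hi1 (by omega)⟩)
        obtain ⟨f', hf'⟩ : ∃ f', cs.length - (PySem.Chars.findFrom cs ['{'] (pos : Int)).toNat
            = f' + 1 := ⟨cs.length - (PySem.Chars.findFrom cs ['{'] (pos : Int)).toNat - 1, by omega⟩
        have hgo : cs.getD (PySem.Chars.findFrom cs ['{'] (pos : Int)).toNat ' ' = '{' := by
          rw [List.getD_eq_getElem cs ' ' ho2]
          have hgg := List.getElem?_eq_getElem ho2
          rw [hgg] at ho3
          exact Option.some.inj ho3
        rw [hskip, hf', pvALoop.eq_2, if_pos ⟨hd, ho2⟩, if_pos hgo]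
        exact ih _ (d + 1) f' fb' (by omega) (by omega) (by omega) (by omega) (by omega)
      · rw [if_neg ho]
        simp only [not_and, not_lt] at ho
        have hchars : ∀ i, pos ≤ i → i < (PySem.Chars.findFrom cs ['}'] (pos : Int)).toNat →
            cs[i]? ≠ some '{' ∧ cs[i]? ≠ some '}' := by
          intro i hi1 hi2
          refine ⟨?_, pvFound_min cs '}' pos hpos hc i hi1 hi2⟩
          by_cases hno : PySem.Chars.findFrom cs ['{'] (pos : Int) = -1
          · exact pvNotFound cs '{' pos hpos hno i hi1
          · have hle := ho hno
            have hno0 := (pvFound_bounds cs '{' pos hpos hno).1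
            exact pvFound_min cs '{' pos hpos hno i hi1 (by omega)
        have hskip := pvALoop_skip cs ((PySem.Chars.findFrom cs ['}'] (pos : Int)).toNat - pos)
          pos (PySem.Chars.findFrom cs ['}'] (pos : Int)).toNat d fa
          (cs.length - (PySem.Chars.findFrom cs ['}'] (pos : Int)).toNat)
          hd hc1 (by omega) (by omega) hfa (by omega) hchars
        obtain ⟨f', hf'⟩ : ∃ f', cs.length - (PySem.Chars.findFrom cs ['}'] (pos : Int)).toNat
            = f' + 1 := ⟨cs.length - (PySem.Chars.findFrom cs ['}'] (pos : Int)).toNat - 1, by omega⟩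
        have hgc : cs.getD (PySem.Chars.findFrom cs ['}'] (pos : Int)).toNat ' ' = '}' := by
          rw [List.getD_eq_getElem cs ' ' hc2]
          have hgg := List.getElem?_eq_getElem hc2
          rw [hgg] at hc3
          exact Option.some.inj hc3
        have hnotopen : cs.getD (PySem.Chars.findFrom cs ['}'] (pos : Int)).toNat ' ' ≠ '{' := by
          rw [hgc]; decide
        rw [hskip, hf', pvALoop.eq_2, if_pos ⟨hd, hc2⟩, if_neg hnotopen, if_pos hgc]
        by_cases hd1 : d - 1 = 0
        · rw [if_pos hd1]
          have hA : pvALoop cs (d - 1) ((PySem.Chars.findFrom cs ['}'] (pos : Int)).toNat + 1) f'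
              = (PySem.Chars.findFrom cs ['}'] (pos : Int)).toNat + 1 := by
            cases f' with
            | zero => rfl
            | succ g => rw [pvALoop.eq_2, if_neg (by omega)]
          rw [hA]
          push_cast
          omega
        · rw [if_neg hd1]
          exact ih _ (d - 1) f' fb' (by omega) (by omega) (by omega) (by omega) (by omega)

-- ===== VERDICT (by name: the statement is the Claim_ definition above) =====
theorem find_method_boundary_py_spec : Claim_equal_find_method_boundary_py := by
  intro content start_pos _
  unfold Spec_find_method_boundary_py find_method_boundary_py find_method_boundary_py_alt
  by_cases hb : PySem.Chars.findFrom content.toList ['{'] start_pos = -1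
  · rw [if_pos hb, if_pos hb]
  · rw [if_neg hb, if_neg hb]
    obtain ⟨k, hk, he⟩ := pvFindFrom_int_cases content.toList ['{'] (by simp) start_pos
    rw [he] at hb ⊢
    obtain ⟨hb0, hb1, hb2, _⟩ := pvFound_bounds content.toList '{' k hk hb
    exact pvMain content.toList content.toList.length _ 1 _ _ one_pos (by omega) (by omega)
      (by omega) (by omega)
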